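-- pv_equiv track=rewrite | github.com/jgforhan/cryptography | keys.py | __miller_robin_decomp__
-- ===== SOURCE A (Python) =====
-- def __miller_robin_decomp__(number):
--     pow2_exp = 0
--     odd_factor = -1
--     while number % 2 == 0:
--         number //= 2
--         pow2_exp += 1
--     odd_factor = number
--     return (odd_factor, pow2_exp)
-- ===== SOURCE B (Python) =====
-- def __miller_robin_decomp__(number):
--     # closed form: trailing-zero count from the isolated lowest set bit
--     pow2_exp = (number & -number).bit_length() - 1
--     return (number >> pow2_exp, pow2_exp)
-- ===== Notes on version B (the rewrite author's own statement) =====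
-- stated objective: alternative
-- what changed: Replaces A's repeated divide-by-2 stripping loop with a loop-free closed form: isolate the lowest set bit (number & -number), take its bit_length to get the exponent, and obtain the odd factor with a single arithmetic shift.
-- outside the precondition, e.g. on __miller_robin_decomp__(0): A does not finish within the time limit, B raises ValueError
import Mathlib
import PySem

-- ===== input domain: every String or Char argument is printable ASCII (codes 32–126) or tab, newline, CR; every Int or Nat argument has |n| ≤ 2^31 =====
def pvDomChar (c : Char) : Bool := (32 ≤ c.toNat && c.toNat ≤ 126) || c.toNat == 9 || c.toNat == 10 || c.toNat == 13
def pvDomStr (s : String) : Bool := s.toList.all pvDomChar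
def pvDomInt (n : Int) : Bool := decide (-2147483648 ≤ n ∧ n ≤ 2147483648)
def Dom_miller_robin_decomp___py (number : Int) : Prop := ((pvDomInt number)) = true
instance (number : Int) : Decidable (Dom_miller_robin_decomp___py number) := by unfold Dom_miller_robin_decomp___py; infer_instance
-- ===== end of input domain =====

-- B replaces A's trailing-zero stripping loop by a closed-form bit computation
-- (isolate the lowest set bit, take its bit_length, shift once); equivalence on nonzero inputs.

-- ===== PORT A =====
-- A's while loop; the extra `number ≠ 0` in the guard only makes the recursion
-- terminate in Lean (Python A loops forever at number = 0, which Pre_ excludes).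
def pvLoopA (number : Int) (pow2_exp : Int) : Int × Int :=
  if h : PySem.Int.mod number 2 = 0 ∧ number ≠ 0 then
    pvLoopA (PySem.Int.floordiv number 2) (pow2_exp + 1)
  else (number, pow2_exp)
termination_by number.natAbs
decreasing_by
  obtain ⟨h1, h2⟩ := h
  rw [PySem.Int.floordiv_eq_ediv_of_pos (by omega)]
  rw [PySem.Int.mod_eq_zero_iff_dvd] at h1
  obtain ⟨c, rfl⟩ := h1
  rw [Int.mul_ediv_cancel_left _ (by norm_num)]
  omega

def miller_robin_decomp___py (number : Int) : Int × Int :=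
  -- pow2_exp = 0; odd_factor = -1 (dead store); loop; odd_factor = number
  pvLoopA number 0

-- ===== PORT B =====
def miller_robin_decomp___py_alt (number : Int) : Int × Int :=
  let pow2_exp : Int := (PySem.Int.bitLength (PySem.Int.band number (-number)) : Int) - 1
  -- Python's `number >> pow2_exp` raises on a negative count (only at number = 0,
  -- excluded by Pre_); `.toNat` just totalises the Nat-shift signature there.
  (number >>> pow2_exp.toNat, pow2_exp)

-- ===== PRECONDITION & SPEC =====
-- Pre_ excludes number = 0: there A's while loop never terminates (0 % 2 == 0 forever),
-- and B raises ValueError (negative shift count).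
def Pre_miller_robin_decomp___py (number : Int) : Prop := number ≠ 0
instance (number : Int) : Decidable (Pre_miller_robin_decomp___py number) := by unfold Pre_miller_robin_decomp___py; infer_instance
def pvWitness_miller_robin_decomp___py : Int := 12

def Spec_miller_robin_decomp___py (number : Int) (out : Int × Int) : Prop := out = miller_robin_decomp___py_alt number
instance (number : Int) (out : Int × Int) : Decidable (Spec_miller_robin_decomp___py number out) := by unfold Spec_miller_robin_decomp___py; infer_instance

-- ===== CLAIM (what is proved, stated in full; the proofs are below) =====
def Claim_equal_miller_robin_decomp___py : Prop := ∀ (number : Int), Dom_miller_robin_decomp___py number → Pre_miller_robin_decomp___py number → Spec_miller_robin_decomp___py number (miller_robin_decomp___py number)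

-- ===== LEMMAS AND PROOFS =====

-- lowest set bit of a positive Nat, as B's `number & -number` computes it on |number|
def pvLow (m : Nat) : Nat := m - (m &&& (m - 1))

theorem pvBand_neg_self (n : Int) (h : n ≠ 0) :
    PySem.Int.band n (-n) = (pvLow n.natAbs : Int) := by
  unfold PySem.Int.band pvLow
  rcases lt_or_gt_of_ne h with hn | hp
  · rw [if_neg (by omega), if_pos (by omega)]
    have h1 : (-n).toNat = n.natAbs := by omega
    have h2 : (-n - 1).toNat = n.natAbs - 1 := by omega
    rw [h1, h2]
  · rw [if_pos (by omega), if_neg (by omega)]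
    have h1 : n.toNat = n.natAbs := by omega
    have h2 : (-(-n) - 1).toNat = n.natAbs - 1 := by omega
    rw [h1, h2]

theorem pvLow_odd (m : Nat) (h : m % 2 = 1) : pvLow m = 1 := by
  obtain ⟨a, rfl⟩ : ∃ a, m = 2 * a + 1 := ⟨m / 2, by omega⟩
  have hb := Nat.land_bit true a false a
  simp [Nat.bit] at hb
  unfold pvLow
  have h2 : 2 * a + 1 - 1 = 2 * a := by omega
  rw [h2, hb]
  omega

theorem pvLow_even (a : Nat) (h : 0 < a) : pvLow (2 * a) = 2 * pvLow a := by
  have hb := Nat.land_bit false a true (a - 1)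
  simp [Nat.bit] at hb
  unfold pvLow
  have h2 : 2 * a - 1 = 2 * (a - 1) + 1 := by omega
  rw [h2, hb]
  have h3 : a &&& (a - 1) ≤ a := Nat.and_le_left
  omega

theorem pvLow_pos (m : Nat) (h : 0 < m) : 0 < pvLow m := by
  unfold pvLow
  have h3 : m &&& (m - 1) ≤ m - 1 := Nat.and_le_right
  omega

theorem pvBl_pos (k : Nat) (h : 0 < k) : 1 ≤ PySem.Int.bitLength (k : Int) := by
  rw [PySem.Int.bitLength_natCast h]
  omega

theorem pvBl_double (k : Nat) (h : 0 < k) :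
    PySem.Int.bitLength ((2 * k : Nat) : Int) = PySem.Int.bitLength (k : Int) + 1 := by
  rw [PySem.Int.bitLength_natCast (show 0 < 2 * k by omega)]
  have h2 : 2 * k / 2 = k := by omega
  rw [h2]

-- the exponent B computes
def pvT (n : Int) : Nat := PySem.Int.bitLength (PySem.Int.band n (-n)) - 1

theorem pvT_odd (n : Int) (h : n ≠ 0) (hm : n.natAbs % 2 = 1) : pvT n = 0 := by
  unfold pvT
  rw [pvBand_neg_self n h, pvLow_odd _ hm]
  decide

theorem pvT_even (c : Int) (hc : c ≠ 0) : pvT (2 * c) = pvT c + 1 := by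
  unfold pvT
  rw [pvBand_neg_self _ (by omega), pvBand_neg_self c hc]
  have h1 : (2 * c).natAbs = 2 * c.natAbs := by omega
  have hcp : 0 < c.natAbs := by omega
  rw [h1, pvLow_even _ hcp, pvBl_double _ (pvLow_pos _ hcp)]
  have := pvBl_pos (pvLow c.natAbs) (pvLow_pos _ hcp)
  omega

theorem pvShift_even (c : Int) (k : Nat) : (2 * c) >>> (k + 1) = c >>> k := by
  rw [Int.shiftRight_eq_div_pow, Int.shiftRight_eq_div_pow]
  have h1 : (((2 : Nat) ^ (k + 1) : Nat) : Int) = 2 * ((2 ^ k : Nat) : Int) := by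
    push_cast; ring
  rw [h1, Int.mul_ediv_mul_of_pos _ _ (by norm_num)]

theorem pvLoop_eq (m : Nat) : ∀ (n e : Int), n ≠ 0 → n.natAbs = m →
    pvLoopA n e = (n >>> pvT n, e + (pvT n : Int)) := by
  induction m using Nat.strong_induction_on with
  | _ m IH =>
    intro n e hn hm
    by_cases hdvd : (2 : Int) ∣ n
    · obtain ⟨c, rfl⟩ := hdvd
      have hc : c ≠ 0 := by omega
      rw [pvLoopA, dif_pos ⟨by rw [PySem.Int.mod_eq_zero_iff_dvd]; exact ⟨c, rfl⟩, hn⟩]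
      have hfd : PySem.Int.floordiv (2 * c) 2 = c := by
        rw [PySem.Int.floordiv_eq_ediv_of_pos (by omega)]
        exact Int.mul_ediv_cancel_left _ (by norm_num)
      rw [hfd, IH c.natAbs (by omega) c (e + 1) hc rfl, pvT_even c hc, pvShift_even]
      have : e + 1 + (pvT c : Int) = e + ((pvT c + 1 : Nat) : Int) := by push_cast; ring
      rw [this]
    · have hm1 : n.natAbs % 2 = 1 := by omega
      rw [pvLoopA, dif_neg (by
        rw [PySem.Int.mod_eq_zero_iff_dvd]
        intro ⟨hd, _⟩; exact hdvd hd)]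
      rw [pvT_odd n hn hm1]
      simp

-- ===== VERDICT (by name: the statement is the Claim_ definition above) =====
theorem miller_robin_decomp___py_spec : Claim_equal_miller_robin_decomp___py := by
  intro number _ hpre
  have hne : number ≠ 0 := hpre
  unfold Spec_miller_robin_decomp___py miller_robin_decomp___py miller_robin_decomp___py_alt
  rw [pvLoop_eq number.natAbs number 0 hne rfl]
  have hb := pvBand_neg_self number hne
  have hpos : 1 ≤ PySem.Int.bitLength (PySem.Int.band number (-number)) := by
    rw [hb]; exact pvBl_pos _ (pvLow_pos _ (by omega))
  unfold pvT
  set B := PySem.Int.bitLength (PySem.Int.band number (-number)) with hB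
  have h1 : ((B : Int) - 1).toNat = B - 1 := by omega
  simp only [h1]
  refine Prod.ext rfl ?_
  show 0 + ((B - 1 : Nat) : Int) = (B : Int) - 1
  omega
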